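-- pv_equiv track=rewrite | github.com/tomasvanagas/prime-research | experiments/circuit_complexity/per_bit_complexity.py | _bdd_size_for_ordering
-- ===== SOURCE A (Python) =====
-- def _bdd_size_for_ordering(truth_table, N, order):
--     """Count unique decision nodes in OBDD with given variable ordering."""
--     # Build OBDD layer by layer
--     # At level i, we have subsets of the truth table indexed by the remaining variables
--     # A node is identified by its truth table restriction
--
--     # Convert truth table to tuple for hashing
--     current_level = {tuple(truth_table): 0}  # map from subtable -> id
--     total_nodes = 0
--
--     for depth, var in enumerate(order):
--         next_level = {}
--         for subtable, _ in current_level.items():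
--             n_remaining = N - depth
--             if n_remaining <= 0:
--                 break
--             half = len(subtable) // 2
--
--             # Split by variable 'var' relative to current indexing
--             # We need to split the subtable based on the variable at position var
--             # in the ORIGINAL ordering
--
--             # Actually, for OBDD, at depth d we branch on order[d]
--             # The subtable has 2^(N-d) entries
--             # Branching on variable order[d] splits into two subtables of size 2^(N-d-1)
--
--             stride = 1 << (N - 1 - var)  # stride for this variable in original indexing
--
--             low_indices = []
--             high_indices = []
--             for i in range(len(subtable)):
--                 if (i >> (N - 1 - var)) & 1:
--                     high_indices.append(i)
--                 else:
--                     low_indices.append(i)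
--
--             low_sub = tuple(subtable[i] for i in low_indices)
--             high_sub = tuple(subtable[i] for i in high_indices)
--
--             if low_sub not in next_level:
--                 next_level[low_sub] = len(next_level)
--             if high_sub not in next_level:
--                 next_level[high_sub] = len(next_level)
--
--         total_nodes += len(current_level)
--         current_level = next_level
--
--     total_nodes += len(current_level)  # terminal nodes
--     return total_nodes
-- ===== SOURCE B (Python) =====
-- def _bdd_size_for_ordering(truth_table, N, order):
--     """Count unique decision nodes in OBDD with given variable ordering.
--
--     Depth-first memoized traversal: levels[d] collects the distinct subtable
--     restrictions occurring at depth d; visiting a subtable once expands it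
--     into its low/high cofactors at the next depth.
--     """
--     levels = [set() for _ in range(len(order) + 1)]
--
--     def visit(sub, depth):
--         if sub in levels[depth]:
--             return  # already expanded at this depth (memoized)
--         levels[depth].add(sub)
--         if depth < len(order) and N - depth > 0:
--             shift = N - 1 - order[depth]
--             low = tuple(sub[i] for i in range(len(sub)) if not ((i >> shift) & 1))
--             high = tuple(sub[i] for i in range(len(sub)) if (i >> shift) & 1)
--             visit(low, depth + 1)
--             visit(high, depth + 1)
--
--     visit(tuple(truth_table), 0)
--     return sum(len(s) for s in levels)
-- ===== Notes on version B (the rewrite author's own statement) =====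
-- stated objective: alternative
-- what changed: Replaces A's level-by-level BFS that rebuilds an id-dictionary per level with a recursive memoized depth-first traversal filling a list of per-depth sets, summed at the end.
import Mathlib
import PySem

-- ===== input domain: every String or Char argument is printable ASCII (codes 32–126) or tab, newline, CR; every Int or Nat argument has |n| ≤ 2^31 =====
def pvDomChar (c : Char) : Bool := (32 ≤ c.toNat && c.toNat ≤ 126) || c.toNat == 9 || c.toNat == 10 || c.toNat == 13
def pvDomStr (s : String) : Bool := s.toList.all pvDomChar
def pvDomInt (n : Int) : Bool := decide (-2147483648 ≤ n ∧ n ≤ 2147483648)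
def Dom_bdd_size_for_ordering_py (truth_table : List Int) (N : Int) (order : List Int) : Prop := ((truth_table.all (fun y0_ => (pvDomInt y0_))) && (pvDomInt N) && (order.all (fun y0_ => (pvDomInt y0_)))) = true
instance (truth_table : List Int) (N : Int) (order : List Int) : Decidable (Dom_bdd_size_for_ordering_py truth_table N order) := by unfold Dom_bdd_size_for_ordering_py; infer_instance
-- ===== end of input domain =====

-- B re-implements the level-by-level BFS over dictionaries as a recursive memoized
-- depth-first traversal over a list of per-depth sets (objective: alternative decomposition).

-- ===== PORT A =====
-- the 'for i in range(len(subtable))' loop appending i to high_indices when (i >> (N-1-var)) & 1 else to low_indices.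
-- The shift amount N-1-var is used through .toNat: exact whenever N-1-var ≥ 0, which Pre_ guarantees
-- (Python raises ValueError on a negative shift).  ('half' and 'stride' in A are dead locals, not ported.)
def pvSplitIdx (n : Int) (sh : Nat) : List Int × List Int :=
  (PySem.List.pyRange 0 n 1).foldl
    (fun acc i => if (i.toNat >>> sh) &&& 1 = 1 then (acc.1, acc.2 ++ [i]) else (acc.1 ++ [i], acc.2))
    ([], [])

-- the inner 'for subtable, _ in current_level.items()' loop, with its 'break'
def pvInnerA (N : Int) (depth : Int) (var : Int) :
    List (List Int × Int) → PySem.Dict (List Int) Int → PySem.Dict (List Int) Int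
  | [], next => next
  | (subtable, _) :: rest, next =>
    if N - depth ≤ 0 then next  -- break
    else
      let sh := (N - 1 - var).toNat
      let idx := pvSplitIdx (subtable.length : Int) sh
      let low_sub := idx.1.map (fun i => (PySem.List.pyGet? subtable i).getD 0)
      let high_sub := idx.2.map (fun i => (PySem.List.pyGet? subtable i).getD 0)
      let next1 := if next.contains low_sub then next else next.insert low_sub (next.size : Int)
      let next2 := if next1.contains high_sub then next1 else next1.insert high_sub (next1.size : Int)
      pvInnerA N depth var rest next2

def bdd_size_for_ordering_py (truth_table : List Int) (N : Int) (order : List Int) : Int :=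
  let st := (PySem.List.enumerate order 0).foldl
    (fun (st : PySem.Dict (List Int) Int × Int) dv =>
      (pvInnerA N dv.1 dv.2 st.1.items PySem.Dict.empty, st.2 + (st.1.size : Int)))
    ((PySem.Dict.empty.insert truth_table 0), 0)
  st.2 + (st.1.size : Int)

-- ===== PORT B =====
-- tuple(sub[i] for i in range(len(sub)) if (i >> (N-1-order[depth])) & 1 == bit); shift via .toNat, exact on Pre_
def pvChildB (N : Int) (var : Int) (sub : List Int) (bit : Nat) : List Int :=
  ((PySem.List.pyRange 0 (sub.length : Int) 1).filter
      (fun i => (i.toNat >>> (N - 1 - var).toNat) &&& 1 == bit)).map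
    (fun i => (PySem.List.pyGet? sub i).getD 0)

-- the recursive memoized 'visit(sub, depth)' of B, threading 'levels' as state
def pvVisit (N : Int) (order : List Int) (sub : List Int) (depth : Nat)
    (levels : List (PySem.Set (List Int))) : List (PySem.Set (List Int)) :=
  let cur := levels.getD depth PySem.Set.empty
  if PySem.Set.contains cur sub then levels
  else
    let levels1 := levels.set depth (PySem.Set.add cur sub)
    if h : depth < order.length ∧ (depth : Int) < N then
      let low := pvChildB N (order.getD depth 0) sub 0
      let high := pvChildB N (order.getD depth 0) sub 1
      pvVisit N order high (depth + 1) (pvVisit N order low (depth + 1) levels1)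
    else levels1
termination_by order.length - depth
decreasing_by all_goals omega

def bdd_size_for_ordering_py_alt (truth_table : List Int) (N : Int) (order : List Int) : Int :=
  let levels : List (PySem.Set (List Int)) := List.replicate (order.length + 1) PySem.Set.empty
  let final := pvVisit N order truth_table 0 levels
  final.foldl (fun acc s => acc + (s.length : Int)) 0

-- ===== PRECONDITION & SPEC =====
-- Pre_ excludes exactly the inputs where Python A raises ValueError: a negative shift amount
-- N-1-order[d] reached at a depth d the loop actually expands (d < len(order) and d < N).
def Pre_bdd_size_for_ordering_py (truth_table : List Int) (N : Int) (order : List Int) : Prop :=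
  ∀ d ∈ List.range order.length, (d : Int) < N → order.getD d 0 < N
instance (truth_table : List Int) (N : Int) (order : List Int) : Decidable (Pre_bdd_size_for_ordering_py truth_table N order) := by unfold Pre_bdd_size_for_ordering_py; infer_instance
def pvWitness_bdd_size_for_ordering_py : List Int × Int × List Int := ([1, 0, 0, 1], 2, [0, 1])

def Spec_bdd_size_for_ordering_py (truth_table : List Int) (N : Int) (order : List Int) (out : Int) : Prop := out = bdd_size_for_ordering_py_alt truth_table N order
instance (truth_table : List Int) (N : Int) (order : List Int) (out : Int) : Decidable (Spec_bdd_size_for_ordering_py truth_table N order out) := by unfold Spec_bdd_size_for_ordering_py; infer_instance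

-- ===== CLAIM (what is proved, stated in full; the proofs are below) =====
def Claim_equal_bdd_size_for_ordering_py : Prop := ∀ (truth_table : List Int) (N : Int) (order : List Int), Dom_bdd_size_for_ordering_py truth_table N order → Pre_bdd_size_for_ordering_py truth_table N order → Spec_bdd_size_for_ordering_py truth_table N order (bdd_size_for_ordering_py truth_table N order)


-- ===== LEMMAS AND PROOFS =====

-- the exact per-level recurrence of A's dictionary keys (= B's per-depth sets, proved below)
def pvReach (N : Int) (order : List Int) (tt : List Int) : Nat → List (List Int)
  | 0 => [tt]
  | d + 1 =>
    if N - (d : Int) ≤ 0 then []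
    else (pvReach N order tt d).foldl
        (fun acc s => PySem.Set.add (PySem.Set.add acc (pvChildB N (order.getD d 0) s 0))
          (pvChildB N (order.getD d 0) s 1)) []

-- t is reachable from subtable s at depth d in exactly k splitting steps
def pvRF (N : Int) (order : List Int) : Nat → List Int → Nat → List Int → Prop
  | 0, s, _, t => t = s
  | k + 1, s, d, t =>
    (d < order.length ∧ (d : Int) < N) ∧
      (pvRF N order k (pvChildB N (order.getD d 0) s 0) (d + 1) t ∨
       pvRF N order k (pvChildB N (order.getD d 0) s 1) (d + 1) t)

-- A's partial state after the first j iterations of the outer loop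
def pvStA (truth_table : List Int) (N : Int) (order : List Int) (j : Nat) :
    PySem.Dict (List Int) Int × Int :=
  (PySem.List.enumerate (order.take j) 0).foldl
    (fun (st : PySem.Dict (List Int) Int × Int) dv =>
      (pvInnerA N dv.1 dv.2 st.1.items PySem.Dict.empty, st.2 + (st.1.size : Int)))
    ((PySem.Dict.empty.insert truth_table 0), 0)

theorem pvSplit_aux (sh : Nat) (l : List Int) (acc : List Int × List Int) :
    l.foldl (fun acc i =>
        if (i.toNat >>> sh) &&& 1 = 1 then (acc.1, acc.2 ++ [i]) else (acc.1 ++ [i], acc.2)) acc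
      = (acc.1 ++ l.filter (fun i => !((i.toNat >>> sh) &&& 1 == 1)),
         acc.2 ++ l.filter (fun i => (i.toNat >>> sh) &&& 1 == 1)) := by
  induction l generalizing acc with
  | nil => simp
  | cons y ys ih =>
    rw [List.foldl_cons]
    by_cases h : (y.toNat >>> sh) &&& 1 = 1
    · rw [if_pos h, ih]
      rw [Nat.and_one_is_mod] at h
      simp [List.filter_cons, h, List.append_assoc]
    · rw [if_neg h, ih]
      rw [Nat.and_one_is_mod] at h
      simp [List.filter_cons, h, List.append_assoc]

theorem pvSplit_eq (n : Int) (sh : Nat) :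
    pvSplitIdx n sh =
      ((PySem.List.pyRange 0 n 1).filter (fun i => !((i.toNat >>> sh) &&& 1 == 1)),
       (PySem.List.pyRange 0 n 1).filter (fun i => (i.toNat >>> sh) &&& 1 == 1)) := by
  unfold pvSplitIdx
  rw [pvSplit_aux]
  simp

theorem pvChildA_eq (N var : Int) (sub : List Int) :
    ((pvSplitIdx (sub.length : Int) ((N - 1 - var).toNat)).1.map
        (fun i => (PySem.List.pyGet? sub i).getD 0) = pvChildB N var sub 0) ∧
    ((pvSplitIdx (sub.length : Int) ((N - 1 - var).toNat)).2.map
        (fun i => (PySem.List.pyGet? sub i).getD 0) = pvChildB N var sub 1) := by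
  rw [pvSplit_eq]
  unfold pvChildB
  constructor
  · apply congrArg
    apply List.filter_congr
    intro i _
    have h2 : (i.toNat >>> (N - 1 - var).toNat) &&& 1 = 0
        ∨ (i.toNat >>> (N - 1 - var).toNat) &&& 1 = 1 := by
      have := Nat.and_one_is_mod (i.toNat >>> (N - 1 - var).toNat); omega
    rcases h2 with h2 | h2 <;> simp [h2]
  · rfl

theorem pvInnerA_break (N depth var : Int) (items : List (List Int × Int))
    (next : PySem.Dict (List Int) Int) (h : N - depth ≤ 0) :
    pvInnerA N depth var items next = next := by
  cases items with
  | nil => rw [pvInnerA]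
  | cons p rest =>
    obtain ⟨sub, v⟩ := p
    rw [pvInnerA, if_pos h]

theorem pvKeys_condInsert (d : PySem.Dict (List Int) Int) (k : List Int) (v : Int) :
    (if d.contains k then d else d.insert k v).keys = PySem.Set.add d.keys k := by
  by_cases hc : d.contains k = true
  · rw [if_pos hc, PySem.Set.add_of_mem ((PySem.Dict.contains_iff_mem_keys d k).mp hc)]
  · rw [if_neg hc, PySem.Dict.keys_insert_of_not_contains d v (by simpa using hc),
      PySem.Set.add_of_not_mem (fun hm => hc ((PySem.Dict.contains_iff_mem_keys d k).mpr hm))]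

theorem pvInnerA_keys (N depth var : Int) (h : ¬ N - depth ≤ 0)
    (items : List (List Int × Int)) :
    ∀ (next : PySem.Dict (List Int) Int), next.keys.Nodup →
    (pvInnerA N depth var items next).keys =
      items.foldl (fun ks p =>
        PySem.Set.add (PySem.Set.add ks (pvChildB N var p.1 0)) (pvChildB N var p.1 1)) next.keys
    ∧ (pvInnerA N depth var items next).keys.Nodup := by
  induction items with
  | nil => intro next hn; exact ⟨rfl, hn⟩
  | cons p rest ih =>
    intro next hn
    obtain ⟨sub, v⟩ := p
    rw [pvInnerA, if_neg h]
    dsimp only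
    obtain ⟨hA0, hA1⟩ := pvChildA_eq N var sub
    rw [hA0, hA1]
    simp only [List.foldl_cons]
    set c0 := pvChildB N var sub 0 with hc0
    set c1 := pvChildB N var sub 1 with hc1
    set t1 := if next.contains c0 = true then next else next.insert c0 ((next.size : Int)) with ht1
    set t2 := if t1.contains c1 = true then t1 else t1.insert c1 ((t1.size : Int)) with ht2
    have h1 : t1.keys = PySem.Set.add next.keys c0 := by
      rw [ht1]; exact pvKeys_condInsert next c0 ((next.size : Int))
    have h2 : t2.keys = PySem.Set.add (PySem.Set.add next.keys c0) c1 := by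
      rw [ht2, pvKeys_condInsert, h1]
    have hn2 : t2.keys.Nodup := by
      rw [h2]; exact PySem.Set.nodup_add _ _ (PySem.Set.nodup_add _ _ hn)
    obtain ⟨hk, hnod⟩ := ih t2 hn2
    exact ⟨by rw [hk, h2], hnod⟩

theorem pvFoldl_items_fst (N var : Int) (l : List (List Int × Int))
    (init : PySem.Set (List Int)) :
    l.foldl (fun ks p =>
        PySem.Set.add (PySem.Set.add ks (pvChildB N var p.1 0)) (pvChildB N var p.1 1)) init
      = (l.map (fun p => p.1)).foldl (fun ks s =>
        PySem.Set.add (PySem.Set.add ks (pvChildB N var s 0)) (pvChildB N var s 1)) init := by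
  induction l generalizing init with
  | nil => rfl
  | cons p rest ih => simp [List.foldl_cons, ih]

theorem pv_A_inv (truth_table : List Int) (N : Int) (order : List Int) :
    ∀ j, j ≤ order.length →
      (pvStA truth_table N order j).1.keys = pvReach N order truth_table j
      ∧ (pvStA truth_table N order j).1.keys.Nodup
      ∧ (pvStA truth_table N order j).2
          = ((List.range j).map (fun e => ((pvReach N order truth_table e).length : Int))).sum := by
  intro j
  induction j with
  | zero =>
    intro _
    have hk : (pvStA truth_table N order 0).1.keys = [truth_table] := by
      simp [pvStA, PySem.List.enumerate,
        PySem.Dict.keys_insert_of_not_contains _ _ (PySem.Dict.contains_empty _),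
        PySem.Dict.keys_empty]
    refine ⟨by rw [hk]; rfl, by rw [hk]; simp, rfl⟩
  | succ j ih =>
    intro hj1
    have hj : j ≤ order.length := by omega
    have hjl : j < order.length := by omega
    obtain ⟨ihk, ihn, ihs⟩ := ih hj
    have htake : order.take (j + 1) = order.take j ++ [order[j]] := by
      rw [List.take_succ, List.getElem?_eq_getElem hjl]
      rfl
    have hstep : pvStA truth_table N order (j + 1)
        = ((pvInnerA N (j : Int) order[j] (pvStA truth_table N order j).1.items PySem.Dict.empty),
           (pvStA truth_table N order j).2 + ((pvStA truth_table N order j).1.size : Int)) := by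
      unfold pvStA
      rw [htake, PySem.List.enumerate_append, List.foldl_append]
      simp [PySem.List.enumerate, List.length_take, Nat.min_eq_left hj]
    have hsize : (((pvStA truth_table N order j).1.size : Nat))
        = (pvReach N order truth_table j).length := by
      rw [← ihk]
      simp [PySem.Dict.size, PySem.Dict.keys]
    have hsum : (pvStA truth_table N order j).2 + ((pvStA truth_table N order j).1.size : Int)
        = ((List.range (j + 1)).map
            (fun e => ((pvReach N order truth_table e).length : Int))).sum := by
      rw [List.range_succ, List.map_append, List.sum_append, ihs, hsize]
      simp
    rw [hstep]
    by_cases hbr : N - (j : Int) ≤ 0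
    · have hb := pvInnerA_break N (j : Int) order[j]
        (pvStA truth_table N order j).1.items PySem.Dict.empty hbr
      refine ⟨?_, ?_, hsum⟩
      · rw [hb]
        show PySem.Dict.empty.keys = pvReach N order truth_table (j + 1)
        rw [pvReach, if_pos hbr, PySem.Dict.keys_empty]
      · rw [hb, PySem.Dict.keys_empty]
        exact List.nodup_nil
    · obtain ⟨hk, hnod⟩ := pvInnerA_keys N (j : Int) order[j] hbr
        (pvStA truth_table N order j).1.items PySem.Dict.empty
        (by rw [PySem.Dict.keys_empty]; exact List.nodup_nil)
      refine ⟨?_, hnod, hsum⟩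
      rw [hk, PySem.Dict.keys_empty, pvFoldl_items_fst]
      have hkeys : (pvStA truth_table N order j).1.items.map (fun p => p.1)
          = (pvStA truth_table N order j).1.keys := rfl
      rw [hkeys, ihk]
      show _ = pvReach N order truth_table (j + 1)
      rw [pvReach, if_neg hbr, List.getD_eq_getElem order 0 hjl]

theorem pv_A_eq_sum (truth_table : List Int) (N : Int) (order : List Int) :
    bdd_size_for_ordering_py truth_table N order =
      ((List.range (order.length + 1)).map
        (fun e => ((pvReach N order truth_table e).length : Int))).sum := by
  obtain ⟨hk, hn, hs⟩ := pv_A_inv truth_table N order order.length le_rfl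
  have hval : bdd_size_for_ordering_py truth_table N order
      = (pvStA truth_table N order order.length).2
        + ((pvStA truth_table N order order.length).1.size : Int) := by
    unfold bdd_size_for_ordering_py pvStA
    rw [List.take_length]
  have hsize : (((pvStA truth_table N order order.length).1.size : Nat))
      = (pvReach N order truth_table order.length).length := by
    rw [← hk]
    simp [PySem.Dict.size, PySem.Dict.keys]
  rw [hval, hs, List.range_succ, List.map_append, List.sum_append, hsize]
  simp

theorem pvGetD_set_self (lv : List (PySem.Set (List Int))) (d : Nat) (v : PySem.Set (List Int))
    (h : d < lv.length) : (lv.set d v).getD d PySem.Set.empty = v := by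
  rw [List.getD_eq_getElem?_getD, List.getElem?_set_self h]
  rfl

theorem pvGetD_set_ne (lv : List (PySem.Set (List Int))) (d e : Nat) (v : PySem.Set (List Int))
    (h : e ≠ d) : (lv.set d v).getD e PySem.Set.empty = lv.getD e PySem.Set.empty := by
  rw [List.getD_eq_getElem?_getD, List.getElem?_set_ne (by omega : d ≠ e),
    ← List.getD_eq_getElem?_getD]

theorem pvGetD_replicate (n e : Nat) :
    (List.replicate n (PySem.Set.empty : PySem.Set (List Int))).getD e PySem.Set.empty
      = PySem.Set.empty := by
  by_cases h : e < n <;>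
    simp [List.getD_eq_getElem?_getD, List.getElem?_replicate, h, PySem.Set.empty]

theorem pvMem_set_add_iff (lv : List (PySem.Set (List Int))) (d e : Nat) (sub x : List Int) :
    (x ∈ (lv.set d (PySem.Set.add (lv.getD d PySem.Set.empty) sub)).getD e PySem.Set.empty
      ↔ x ∈ lv.getD e PySem.Set.empty ∨ (e = d ∧ d < lv.length ∧ x = sub)) := by
  by_cases hd : d < lv.length
  · by_cases he : e = d
    · subst he
      rw [pvGetD_set_self _ _ _ hd, PySem.Set.mem_add]
      constructor
      · rintro (h | h)
        · exact Or.inl h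
        · exact Or.inr ⟨rfl, hd, h⟩
      · rintro (h | ⟨-, -, h⟩)
        · exact Or.inl h
        · exact Or.inr h
    · rw [pvGetD_set_ne _ _ _ _ he]
      constructor
      · exact Or.inl
      · rintro (h | ⟨he2, -, -⟩)
        · exact h
        · exact absurd he2 he
  · rw [List.set_eq_of_length_le (by omega)]
    constructor
    · exact Or.inl
    · rintro (h | ⟨-, hd2, -⟩)
      · exact h
      · exact absurd hd2 hd

theorem pvVisit_length (N : Int) (order : List Int) (sub : List Int) (depth : Nat)
    (lv : List (PySem.Set (List Int))) :
    (pvVisit N order sub depth lv).length = lv.length := by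
  suffices h : ∀ n (sub : List Int) (depth : Nat) (lv : List (PySem.Set (List Int))),
      order.length - depth ≤ n → (pvVisit N order sub depth lv).length = lv.length from
    h (order.length - depth) sub depth lv le_rfl
  intro n
  induction n with
  | zero =>
    intro sub depth lv hn
    rw [pvVisit.eq_def]
    dsimp only
    split_ifs with h1 h2
    · rfl
    · exact absurd h2.1 (by omega)
    · simp
  | succ n ih =>
    intro sub depth lv hn
    rw [pvVisit.eq_def]
    dsimp only
    split_ifs with h1 h2
    · rfl
    · rw [ih _ _ _ (by omega), ih _ _ _ (by omega)]
      simp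
    · simp

theorem pvVisit_mono (N : Int) (order : List Int) (sub : List Int) (depth : Nat)
    (lv : List (PySem.Set (List Int))) (e : Nat) (x : List Int)
    (hx : x ∈ lv.getD e PySem.Set.empty) :
    x ∈ (pvVisit N order sub depth lv).getD e PySem.Set.empty := by
  suffices h : ∀ n (sub : List Int) (depth : Nat) (lv : List (PySem.Set (List Int))),
      order.length - depth ≤ n → x ∈ lv.getD e PySem.Set.empty →
      x ∈ (pvVisit N order sub depth lv).getD e PySem.Set.empty from
    h (order.length - depth) sub depth lv le_rfl hx
  intro n
  induction n with
  | zero =>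
    intro sub depth lv hn hx
    rw [pvVisit.eq_def]
    dsimp only
    split_ifs with h1 h2
    · exact hx
    · exact absurd h2.1 (by omega)
    · exact (pvMem_set_add_iff lv depth e sub x).mpr (Or.inl hx)
  | succ n ih =>
    intro sub depth lv hn hx
    rw [pvVisit.eq_def]
    dsimp only
    split_ifs with h1 h2
    · exact hx
    · exact ih _ _ _ (by omega) (ih _ _ _ (by omega)
        ((pvMem_set_add_iff lv depth e sub x).mpr (Or.inl hx)))
    · exact (pvMem_set_add_iff lv depth e sub x).mpr (Or.inl hx)

theorem pvVisit_self (N : Int) (order : List Int) (sub : List Int) (depth : Nat)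
    (lv : List (PySem.Set (List Int))) (hd : depth < lv.length) :
    sub ∈ (pvVisit N order sub depth lv).getD depth PySem.Set.empty := by
  rw [pvVisit.eq_def]
  dsimp only
  split_ifs with h1 h2
  · exact (PySem.Set.contains_iff _ _).mp h1
  · apply pvVisit_mono
    apply pvVisit_mono
    exact (pvMem_set_add_iff lv depth depth sub sub).mpr (Or.inr ⟨rfl, hd, rfl⟩)
  · exact (pvMem_set_add_iff lv depth depth sub sub).mpr (Or.inr ⟨rfl, hd, rfl⟩)

theorem pvVisit_sound (N : Int) (order : List Int) (sub : List Int) (depth : Nat)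
    (lv : List (PySem.Set (List Int))) (e : Nat) (x : List Int)
    (hx : x ∈ (pvVisit N order sub depth lv).getD e PySem.Set.empty) :
    x ∈ lv.getD e PySem.Set.empty ∨ ∃ k, e = depth + k ∧ pvRF N order k sub depth x := by
  suffices h : ∀ n (sub : List Int) (depth : Nat) (lv : List (PySem.Set (List Int))),
      order.length - depth ≤ n →
      x ∈ (pvVisit N order sub depth lv).getD e PySem.Set.empty →
      x ∈ lv.getD e PySem.Set.empty ∨ ∃ k, e = depth + k ∧ pvRF N order k sub depth x from
    h (order.length - depth) sub depth lv le_rfl hx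
  intro n
  induction n with
  | zero =>
    intro sub depth lv hn hx
    rw [pvVisit.eq_def] at hx
    dsimp only at hx
    split_ifs at hx with h1 h2
    · exact Or.inl hx
    · exact absurd h2.1 (by omega)
    · rcases (pvMem_set_add_iff lv depth e sub x).mp hx with h | ⟨he, -, hxs⟩
      · exact Or.inl h
      · exact Or.inr ⟨0, by omega, hxs⟩
  | succ n ih =>
    intro sub depth lv hn hx
    rw [pvVisit.eq_def] at hx
    dsimp only at hx
    split_ifs at hx with h1 h2
    · exact Or.inl hx
    · rcases ih _ _ _ (by omega) hx with h | ⟨k, hek, hrf⟩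
      · rcases ih _ _ _ (by omega) h with h' | ⟨k, hek, hrf⟩
        · rcases (pvMem_set_add_iff lv depth e sub x).mp h' with h'' | ⟨he, -, hxs⟩
          · exact Or.inl h''
          · exact Or.inr ⟨0, by omega, hxs⟩
        · exact Or.inr ⟨k + 1, by omega, ⟨h2, Or.inl hrf⟩⟩
      · exact Or.inr ⟨k + 1, by omega, ⟨h2, Or.inr hrf⟩⟩
    · rcases (pvMem_set_add_iff lv depth e sub x).mp hx with h | ⟨he, -, hxs⟩
      · exact Or.inl h
      · exact Or.inr ⟨0, by omega, hxs⟩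

theorem pvVisit_nodup (N : Int) (order : List Int) (sub : List Int) (depth : Nat)
    (lv : List (PySem.Set (List Int))) (hn : ∀ e, (lv.getD e PySem.Set.empty).Nodup) :
    ∀ e, ((pvVisit N order sub depth lv).getD e PySem.Set.empty).Nodup := by
  suffices h : ∀ n (sub : List Int) (depth : Nat) (lv : List (PySem.Set (List Int))),
      order.length - depth ≤ n → (∀ e, (lv.getD e PySem.Set.empty).Nodup) →
      ∀ e, ((pvVisit N order sub depth lv).getD e PySem.Set.empty).Nodup from
    h (order.length - depth) sub depth lv le_rfl hn
  intro n
  have hset : ∀ (lv : List (PySem.Set (List Int))) (depth : Nat) (sub : List Int),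
      (∀ e, (lv.getD e PySem.Set.empty).Nodup) →
      ∀ e, ((lv.set depth (PySem.Set.add (lv.getD depth PySem.Set.empty) sub)).getD e
        PySem.Set.empty).Nodup := by
    intro lv depth sub hn e
    by_cases hd : depth < lv.length
    · by_cases he : e = depth
      · subst he
        rw [pvGetD_set_self _ _ _ hd]
        exact PySem.Set.nodup_add _ _ (hn e)
      · rw [pvGetD_set_ne _ _ _ _ he]
        exact hn e
    · rw [List.set_eq_of_length_le (by omega)]
      exact hn e
  induction n with
  | zero =>
    intro sub depth lv hb hn e
    rw [pvVisit.eq_def]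
    dsimp only
    split_ifs with h1 h2
    · exact hn e
    · exact absurd h2.1 (by omega)
    · exact hset lv depth sub hn e
  | succ n ih =>
    intro sub depth lv hb hn e
    rw [pvVisit.eq_def]
    dsimp only
    split_ifs with h1 h2
    · exact hn e
    · exact ih _ _ _ (by omega) (ih _ _ _ (by omega) (hset lv depth sub hn)) e
    · exact hset lv depth sub hn e

theorem pvVisit_newClosed (N : Int) (order : List Int) (sub : List Int) (depth : Nat)
    (lv : List (PySem.Set (List Int))) (hlen : lv.length = order.length + 1)
    (e : Nat) (x : List Int)
    (hx : x ∈ (pvVisit N order sub depth lv).getD e PySem.Set.empty) :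
    x ∈ lv.getD e PySem.Set.empty ∨
      ((e < order.length ∧ (e : Int) < N) →
        pvChildB N (order.getD e 0) x 0 ∈ (pvVisit N order sub depth lv).getD (e + 1) PySem.Set.empty ∧
        pvChildB N (order.getD e 0) x 1 ∈ (pvVisit N order sub depth lv).getD (e + 1) PySem.Set.empty) := by
  suffices h : ∀ n (sub : List Int) (depth : Nat) (lv : List (PySem.Set (List Int))),
      order.length - depth ≤ n → lv.length = order.length + 1 →
      ∀ x, x ∈ (pvVisit N order sub depth lv).getD e PySem.Set.empty →
      x ∈ lv.getD e PySem.Set.empty ∨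
        ((e < order.length ∧ (e : Int) < N) →
          pvChildB N (order.getD e 0) x 0 ∈ (pvVisit N order sub depth lv).getD (e + 1) PySem.Set.empty ∧
          pvChildB N (order.getD e 0) x 1 ∈ (pvVisit N order sub depth lv).getD (e + 1) PySem.Set.empty) from
    h (order.length - depth) sub depth lv le_rfl hlen x hx
  intro n
  induction n with
  | zero =>
    intro sub depth lv hb hlen x hx
    rw [pvVisit.eq_def] at hx ⊢
    dsimp only at hx ⊢
    split_ifs at hx ⊢ with h1 h2
    · exact Or.inl hx
    · exact absurd h2.1 (by omega)
    · rcases (pvMem_set_add_iff lv depth e sub x).mp hx with h | ⟨he, hdl, hxs⟩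
      · exact Or.inl h
      · refine Or.inr fun hexp => absurd hexp.1 ?_
        omega
  | succ n ih =>
    intro sub depth lv hb hlen x hx
    rw [pvVisit.eq_def] at hx ⊢
    dsimp only at hx ⊢
    split_ifs at hx ⊢ with h1 h2
    · exact Or.inl hx
    · -- hx : x ∈ (pvVisit high (depth+1) (pvVisit low (depth+1) lv1)).getD e []
      set lv1 := lv.set depth (PySem.Set.add (lv.getD depth PySem.Set.empty) sub) with hlv1
      have hlen1 : lv1.length = order.length + 1 := by
        rw [hlv1, List.length_set, hlen]
      have hlenM : (pvVisit N order (pvChildB N (order.getD depth 0) sub 0) (depth + 1) lv1).length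
          = order.length + 1 := by
        rw [pvVisit_length, hlen1]
      rcases ih _ _ _ (by omega) hlenM x hx with hM | hdone
      · rcases ih _ _ _ (by omega) hlen1 x hM with hlv1x | hcls
        · rcases (pvMem_set_add_iff lv depth e sub x).mp hlv1x with h | ⟨he, hdl, hxs⟩
          · exact Or.inl h
          · subst he
            subst hxs
            refine Or.inr fun hexp => ?_
            constructor
            · apply pvVisit_mono
              apply pvVisit_self
              rw [hlen1]
              omega
            · apply pvVisit_self
              rw [pvVisit_length, hlen1]
              omega
        · refine Or.inr fun hexp => ?_
          obtain ⟨hl, hh⟩ := hcls hexp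
          exact ⟨pvVisit_mono _ _ _ _ _ _ _ hl, pvVisit_mono _ _ _ _ _ _ _ hh⟩
      · exact Or.inr hdone
    · rcases (pvMem_set_add_iff lv depth e sub x).mp hx with h | ⟨he, hdl, hxs⟩
      · exact Or.inl h
      · refine Or.inr fun hexp => absurd hexp.1 ?_
        omega

theorem pvRF_succ_back (N : Int) (order : List Int) (k : Nat) :
    ∀ (s : List Int) (d : Nat) (x : List Int),
      pvRF N order (k + 1) s d x ↔
        ((d + k < order.length ∧ ((d + k : Nat) : Int) < N) ∧
          ∃ p, pvRF N order k s d p ∧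
            (x = pvChildB N (order.getD (d + k) 0) p 0 ∨
             x = pvChildB N (order.getD (d + k) 0) p 1)) := by
  induction k with
  | zero =>
    intro s d x
    constructor
    · rintro ⟨hg, hor⟩
      exact ⟨hg, s, rfl, hor⟩
    · rintro ⟨hg, p, hp, hx⟩
      have hps : p = s := hp
      subst hps
      exact ⟨hg, hx⟩
  | succ k ih =>
    intro s d x
    constructor
    · rintro ⟨hg, hor⟩
      have hidx : d + 1 + k = d + (k + 1) := by omega
      rcases hor with h | h
      · obtain ⟨hg2, p, hp, hx⟩ := (ih _ _ _).mp h
        rw [hidx] at hg2 hx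
        exact ⟨hg2, p, ⟨hg, Or.inl hp⟩, hx⟩
      · obtain ⟨hg2, p, hp, hx⟩ := (ih _ _ _).mp h
        rw [hidx] at hg2 hx
        exact ⟨hg2, p, ⟨hg, Or.inr hp⟩, hx⟩
    · rintro ⟨hg2, p, hp, hx⟩
      obtain ⟨hgp, hpor⟩ := hp
      refine ⟨hgp, ?_⟩
      have hidx : d + (k + 1) = d + 1 + k := by omega
      rw [hidx] at hg2 hx
      rcases hpor with hp' | hp'
      · exact Or.inl ((ih _ _ _).mpr ⟨hg2, p, hp', hx⟩)
      · exact Or.inr ((ih _ _ _).mpr ⟨hg2, p, hp', hx⟩)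

theorem pvMem_foldl_addadd (f g : List Int → List Int) (l : List (List Int))
    (acc : PySem.Set (List Int)) (x : List Int) :
    (x ∈ l.foldl (fun acc s => PySem.Set.add (PySem.Set.add acc (f s)) (g s)) acc
      ↔ x ∈ acc ∨ ∃ s ∈ l, x = f s ∨ x = g s) := by
  induction l generalizing acc with
  | nil => simp
  | cons y ys ih =>
    rw [List.foldl_cons, ih]
    simp only [PySem.Set.mem_add, List.mem_cons]
    constructor
    · rintro (((h | h) | h) | ⟨s, hs, hx⟩)
      · exact Or.inl h
      · exact Or.inr ⟨y, Or.inl rfl, Or.inl h⟩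
      · exact Or.inr ⟨y, Or.inl rfl, Or.inr h⟩
      · exact Or.inr ⟨s, Or.inr hs, hx⟩
    · rintro (h | ⟨s, hs | hs, hx⟩)
      · exact Or.inl (Or.inl (Or.inl h))
      · subst hs
        rcases hx with hx | hx
        · exact Or.inl (Or.inl (Or.inr hx))
        · exact Or.inl (Or.inr hx)
      · exact Or.inr ⟨s, hs, hx⟩

theorem pvNodup_foldl_addadd (f g : List Int → List Int) (l : List (List Int))
    (acc : PySem.Set (List Int)) (h : acc.Nodup) :
    (l.foldl (fun acc s => PySem.Set.add (PySem.Set.add acc (f s)) (g s)) acc).Nodup := by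
  induction l generalizing acc with
  | nil => exact h
  | cons y ys ih =>
    exact ih _ (PySem.Set.nodup_add _ _ (PySem.Set.nodup_add _ _ h))

theorem pvReach_nodup (N : Int) (order : List Int) (tt : List Int) (e : Nat) :
    (pvReach N order tt e).Nodup := by
  cases e with
  | zero => simp [pvReach]
  | succ e =>
    rw [pvReach]
    split_ifs with h
    · exact List.nodup_nil
    · exact pvNodup_foldl_addadd _ _ _ _ List.nodup_nil

theorem pvReach_iff (N : Int) (order : List Int) (tt : List Int) (e : Nat)
    (he : e ≤ order.length) (x : List Int) :
    x ∈ pvReach N order tt e ↔ pvRF N order e tt 0 x := by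
  induction e generalizing x with
  | zero =>
    simp only [pvReach, List.mem_singleton]
    constructor
    · intro h; exact h
    · intro h; exact h
  | succ e ih =>
    rw [pvReach, pvRF_succ_back]
    simp only [Nat.zero_add]
    split_ifs with hbr
    · simp only [List.not_mem_nil, false_iff]
      rintro ⟨⟨-, hlt⟩, -⟩
      omega
    · rw [pvMem_foldl_addadd]
      constructor
      · rintro (h | ⟨s, hs, hx⟩)
        · simp at h
        · exact ⟨⟨by omega, by omega⟩, s, (ih (by omega) s).mp hs, hx⟩
      · rintro ⟨hg, p, hp, hx⟩
        exact Or.inr ⟨p, (ih (by omega) p).mpr hp, hx⟩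

theorem pv_B_level_iff (N : Int) (order : List Int) (tt : List Int) (e : Nat)
    (he : e ≤ order.length) (x : List Int) :
    x ∈ (pvVisit N order tt 0 (List.replicate (order.length + 1) PySem.Set.empty)).getD e
        PySem.Set.empty
      ↔ pvRF N order e tt 0 x := by
  constructor
  · intro hx
    rcases pvVisit_sound N order tt 0 _ e x hx with h | ⟨k, hek, hrf⟩
    · rw [pvGetD_replicate] at h
      simp [PySem.Set.empty] at h
    · have hke : k = e := by omega
      rw [hke] at hrf
      exact hrf
  · intro hrf
    have hclosed : ∀ d (s : List Int),
        s ∈ (pvVisit N order tt 0 (List.replicate (order.length + 1) PySem.Set.empty)).getD d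
          PySem.Set.empty →
        (d < order.length ∧ (d : Int) < N) →
        pvChildB N (order.getD d 0) s 0
            ∈ (pvVisit N order tt 0 (List.replicate (order.length + 1) PySem.Set.empty)).getD (d + 1)
              PySem.Set.empty ∧
        pvChildB N (order.getD d 0) s 1
            ∈ (pvVisit N order tt 0 (List.replicate (order.length + 1) PySem.Set.empty)).getD (d + 1)
              PySem.Set.empty := by
      intro d s hs hg
      rcases pvVisit_newClosed N order tt 0 _ (by simp) d s hs with h | h
      · rw [pvGetD_replicate] at h
        simp [PySem.Set.empty] at h
      · exact h hg
    have hcomp : ∀ k (s : List Int) (d : Nat) (y : List Int),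
        s ∈ (pvVisit N order tt 0 (List.replicate (order.length + 1) PySem.Set.empty)).getD d
          PySem.Set.empty →
        pvRF N order k s d y →
        y ∈ (pvVisit N order tt 0 (List.replicate (order.length + 1) PySem.Set.empty)).getD (d + k)
          PySem.Set.empty := by
      intro k
      induction k with
      | zero =>
        intro s d y hs hr
        have hys : y = s := hr
        rw [hys]
        exact hs
      | succ k ihk =>
        intro s d y hs hr
        obtain ⟨hg, hor⟩ := hr
        obtain ⟨hl, hh⟩ := hclosed d s hs hg
        have hidx : d + (k + 1) = d + 1 + k := by omega
        rw [hidx]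
        rcases hor with h | h
        · exact ihk _ _ _ hl h
        · exact ihk _ _ _ hh h
    have htt : tt ∈ (pvVisit N order tt 0
        (List.replicate (order.length + 1) PySem.Set.empty)).getD 0 PySem.Set.empty :=
      pvVisit_self N order tt 0 _ (by simp)
    have := hcomp e tt 0 x htt hrf
    simpa using this

theorem pvFoldl_len_sum (ls : List (PySem.Set (List Int))) :
    ls.foldl (fun acc s => acc + (s.length : Int)) 0
      = ((List.range ls.length).map (fun e => ((ls.getD e PySem.Set.empty).length : Int))).sum := by
  rw [PySem.List.foldl_add]
  simp only [zero_add]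
  congr 1
  apply List.ext_getElem (by simp)
  intro i h1 h2
  simp only [List.getElem_map, List.getElem_range]
  rw [List.getD_eq_getElem _ _ (by simpa using h1)]

theorem pv_B_eq_sum (truth_table : List Int) (N : Int) (order : List Int) :
    bdd_size_for_ordering_py_alt truth_table N order =
      ((List.range (order.length + 1)).map
        (fun e => (((pvVisit N order truth_table 0
          (List.replicate (order.length + 1) PySem.Set.empty)).getD e PySem.Set.empty).length : Int))).sum := by
  have hlen : (pvVisit N order truth_table 0
      (List.replicate (order.length + 1) PySem.Set.empty)).length = order.length + 1 := by
    rw [pvVisit_length]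
    simp
  show (pvVisit N order truth_table 0
      (List.replicate (order.length + 1) PySem.Set.empty)).foldl
        (fun acc s => acc + (s.length : Int)) 0 = _
  rw [pvFoldl_len_sum, hlen]

-- ===== VERDICT (by name: the statement is the Claim_ definition above) =====
theorem bdd_size_for_ordering_py_spec : Claim_equal_bdd_size_for_ordering_py := by
  intro truth_table N order _ _
  unfold Spec_bdd_size_for_ordering_py
  rw [pv_A_eq_sum, pv_B_eq_sum]
  apply congrArg
  apply List.map_congr_left
  intro e he
  rw [List.mem_range] at he
  have he' : e ≤ order.length := by omega
  have h1 := pvReach_nodup N order truth_table e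
  have h2 := pvVisit_nodup N order truth_table 0 (List.replicate (order.length + 1) PySem.Set.empty)
    (by
      intro e'
      rw [pvGetD_replicate]
      exact List.nodup_nil) e
  have hperm : (pvReach N order truth_table e).Perm
      ((pvVisit N order truth_table 0 (List.replicate (order.length + 1) PySem.Set.empty)).getD e
        PySem.Set.empty) := by
    rw [List.perm_ext_iff_of_nodup h1 h2]
    intro a
    rw [pvReach_iff N order truth_table e he', pv_B_level_iff N order truth_table e he']
  exact congrArg _ hperm.length_eq
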